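-- pv_equiv track=rewrite | github.com/miketrcs/RCSGAMDevelopment | gamgmaildeletebymsgidparallel.py | is_check_found_output
-- ===== SOURCE A (Python) =====
-- def is_check_found_output(output_l: str) -> bool:
--     markers = (
--         "would delete",
--         "would be deleted",
--         "not deleted:",
--         "messages matched",
--         "got 1 message",
--         "got 2 messages",
--         "got 3 messages",
--         "got 4 messages",
--         "got 5 messages",
--         "got 6 messages",
--         "got 7 messages",
--         "got 8 messages",
--         "got 9 messages",
--     )
--     return any(marker in output_l for marker in markers)
-- ===== SOURCE B (Python) =====
-- def is_check_found_output(output_l: str) -> bool: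
--     # Single left-to-right scan: at each position test the fixed markers as
--     # prefixes, and recognise the nine "got N message(s)" markers by one
--     # digit check instead of nine separate substring scans.
--     fixed = ("would delete", "would be deleted", "not deleted:", "messages matched")
--     n = len(output_l)
--     for i in range(n):
--         if any(output_l.startswith(m, i) for m in fixed):
--             return True
--         if output_l.startswith("got ", i) and i + 4 < n and output_l[i + 4] in "123456789":
--             tail = " message" if output_l[i + 4] == "1" else " messages"
--             if output_l.startswith(tail, i + 5):
--                 return True
--     return False
-- ===== Notes on version B (the rewrite author's own statement) =====
-- stated objective: alternative
-- what changed: Replaced thirteen independent whole-string substring scans (one per marker) with a single left-to-right pass that, at each position, tests the fixed markers as prefixes and recognises all nine got-count markers via one digit check.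
import Mathlib
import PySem

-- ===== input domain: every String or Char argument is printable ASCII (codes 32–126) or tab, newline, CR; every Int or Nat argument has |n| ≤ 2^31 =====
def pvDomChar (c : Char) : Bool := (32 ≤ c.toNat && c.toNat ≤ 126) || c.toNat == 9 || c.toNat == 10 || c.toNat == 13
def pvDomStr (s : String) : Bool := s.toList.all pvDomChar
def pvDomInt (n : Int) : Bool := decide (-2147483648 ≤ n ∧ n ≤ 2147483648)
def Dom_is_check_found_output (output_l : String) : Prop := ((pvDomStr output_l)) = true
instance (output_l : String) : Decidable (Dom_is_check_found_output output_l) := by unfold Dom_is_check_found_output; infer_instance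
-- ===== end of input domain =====

-- B replaces A's thirteen separate substring scans by one left-to-right scan that
-- tests prefixes at each position, folding the nine "got N message(s)" markers
-- into a single digit check (objective: alternative single-pass strategy).

-- ===== PORT A =====
def pvMarkersA : List String :=
  ["would delete", "would be deleted", "not deleted:", "messages matched",
   "got 1 message", "got 2 messages", "got 3 messages", "got 4 messages",
   "got 5 messages", "got 6 messages", "got 7 messages", "got 8 messages",
   "got 9 messages"]

def is_check_found_output (output_l : String) : Bool :=
  pvMarkersA.any (fun marker => PySem.Str.isIn marker output_l)

-- ===== PORT B =====
def pvFixedB : List (List Char) :=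
  ["would delete".toList, "would be deleted".toList,
   "not deleted:".toList, "messages matched".toList]

def pvDigitsB : List Char := "123456789".toList

-- the body of B's loop at position i, acting on the suffix output_l[i:]
-- ('output_l.startswith(m, i)' = m.isPrefixOf (suffix); 'i + 4 < n and output_l[i+4]'
--  = the suffix dropped by 4 is nonempty with head d — exact on every input)
def pvGotAt (u : List Char) : Bool :=
  "got ".toList.isPrefixOf u &&
    (match u.drop 4 with
     | [] => false
     | d :: rest =>
       pvDigitsB.contains d &&
         (if d = '1' then " message".toList.isPrefixOf rest
          else " messages".toList.isPrefixOf rest))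

def pvHit (u : List Char) : Bool :=
  pvFixedB.any (fun m => m.isPrefixOf u) || pvGotAt u

-- 'for i in range(n)': one recursive step per position, early return via ||
def pvScan : List Char → Bool
  | [] => false
  | c :: r => pvHit (c :: r) || pvScan r

def is_check_found_output_alt (output_l : String) : Bool :=
  pvScan output_l.toList

-- ===== PRECONDITION & SPEC =====
def Spec_is_check_found_output (output_l : String) (out : Bool) : Prop := out = is_check_found_output_alt output_l
instance (output_l : String) (out : Bool) : Decidable (Spec_is_check_found_output output_l out) := by unfold Spec_is_check_found_output; infer_instance

-- ===== CLAIM (what is proved, stated in full; the proofs are below) =====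
def Claim_equal_is_check_found_output : Prop := ∀ (output_l : String), Dom_is_check_found_output output_l → Spec_is_check_found_output output_l (is_check_found_output output_l)

-- ===== LEMMAS AND PROOFS =====

-- the full marker a hit at digit d certifies
def pvGotMarker (d : Char) : List Char :=
  "got ".toList ++ d :: (if d = '1' then " message".toList else " messages".toList)

-- A's marker list is exactly B's fixed markers plus the digit-indexed got-markers
theorem pvMarkers_split :
    pvMarkersA.map String.toList = pvFixedB ++ pvDigitsB.map pvGotMarker := by
  decide

theorem pvGotAt_iff (u : List Char) :
    pvGotAt u = true ↔ ∃ d ∈ pvDigitsB, pvGotMarker d <+: u := by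
  constructor
  · intro h
    unfold pvGotAt at h
    rw [Bool.and_eq_true] at h
    obtain ⟨hp, hm⟩ := h
    rw [List.isPrefixOf_iff_prefix] at hp
    cases h4 : u.drop 4 with
    | nil => rw [h4] at hm; simp at hm
    | cons d rest =>
      rw [h4] at hm
      rw [Bool.and_eq_true] at hm
      obtain ⟨hd, ht⟩ := hm
      refine ⟨d, by simpa using hd, ?_⟩
      have hu : "got ".toList ++ u.drop 4 = u := by
        have := List.prefix_iff_eq_append.mp hp
        simpa using this
      rw [h4] at hu
      rw [pvGotMarker, ← hu]
      rw [List.prefix_append_right_inj, List.cons_prefix_cons]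
      refine ⟨rfl, ?_⟩
      split at ht <;> rename_i hd1
      · rw [if_pos hd1]; exact List.isPrefixOf_iff_prefix.mp ht
      · rw [if_neg hd1]; exact List.isPrefixOf_iff_prefix.mp ht
  · rintro ⟨d, hd, hpre⟩
    obtain ⟨w, hw⟩ := hpre
    unfold pvGotAt
    rw [Bool.and_eq_true]
    have hu : u = "got ".toList ++ (d :: ((if d = '1' then " message".toList else " messages".toList) ++ w)) := by
      rw [← hw, pvGotMarker]; simp
    constructor
    · rw [List.isPrefixOf_iff_prefix, hu]; exact ⟨_, rfl⟩
    · have hdrop : u.drop 4 = d :: ((if d = '1' then " message".toList else " messages".toList) ++ w) := by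
        rw [hu]
        have : ("got ".toList).length = 4 := by decide
        rw [← this, List.drop_left]
      rw [hdrop, Bool.and_eq_true]
      refine ⟨by simpa using hd, ?_⟩
      by_cases hd1 : d = '1'
      · simp [hd1]
      · simp [hd1]


theorem pvHit_iff (u : List Char) :
    pvHit u = true ↔ ∃ m ∈ pvMarkersA, m.toList <+: u := by
  have : (∃ m ∈ pvMarkersA, m.toList <+: u) ↔
      ∃ l ∈ pvMarkersA.map String.toList, l <+: u := by
    simp
  rw [this, pvMarkers_split]
  simp only [List.mem_append, List.mem_map]
  constructor
  · intro h
    rw [pvHit, Bool.or_eq_true] at h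
    rcases h with h | h
    · rw [List.any_eq_true] at h
      obtain ⟨m, hm, hp⟩ := h
      exact ⟨m, Or.inl hm, List.isPrefixOf_iff_prefix.mp hp⟩
    · obtain ⟨d, hd, hp⟩ := (pvGotAt_iff u).mp h
      exact ⟨pvGotMarker d, Or.inr ⟨d, hd, rfl⟩, hp⟩
  · rintro ⟨l, hl | ⟨d, hd, rfl⟩, hp⟩
    · rw [pvHit, Bool.or_eq_true]; left
      rw [List.any_eq_true]
      exact ⟨l, hl, List.isPrefixOf_iff_prefix.mpr hp⟩
    · rw [pvHit, Bool.or_eq_true]; right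
      exact (pvGotAt_iff u).mpr ⟨d, hd, hp⟩

theorem pvScan_iff (t : List Char) :
    pvScan t = true ↔ ∃ j, pvHit (t.drop j) = true := by
  induction t with
  | nil =>
    simp only [pvScan, List.drop_nil]
    constructor
    · intro h; exact absurd h (by simp)
    · rintro ⟨j, hj⟩; exact absurd hj (by decide)
  | cons c r ih =>
    rw [pvScan, Bool.or_eq_true, ih]
    constructor
    · rintro (h | ⟨j, hj⟩)
      · exact ⟨0, h⟩
      · exact ⟨j + 1, by simpa using hj⟩
    · rintro ⟨j, hj⟩
      cases j with
      | zero => exact Or.inl hj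
      | succ j => exact Or.inr ⟨j, by simpa using hj⟩

theorem pv_eq (s : String) : is_check_found_output s = is_check_found_output_alt s := by
  rw [Bool.eq_iff_iff]
  rw [is_check_found_output, is_check_found_output_alt, List.any_eq_true, pvScan_iff]
  constructor
  · rintro ⟨m, hm, hin⟩
    have := (PySem.Chars.exists_prefix_drop_iff_isIn m.toList s.toList).mpr
      (by simpa [PySem.Str.isIn] using hin)
    obtain ⟨j, hj⟩ := this
    exact ⟨j, (pvHit_iff _).mpr ⟨m, hm, hj⟩⟩
  · rintro ⟨j, hj⟩
    obtain ⟨m, hm, hp⟩ := (pvHit_iff _).mp hj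
    refine ⟨m, hm, ?_⟩
    have := (PySem.Chars.exists_prefix_drop_iff_isIn m.toList s.toList).mp ⟨j, hp⟩
    simpa [PySem.Str.isIn] using this

-- ===== VERDICT (by name: the statement is the Claim_ definition above) =====
theorem is_check_found_output_spec : Claim_equal_is_check_found_output := by
  intro s _
  exact pv_eq s
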